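-- pv_equiv track=rewrite | github.com/langedev/AdventOfCode | Python/2023/13/main.py | findMirror
-- ===== SOURCE A (Python) =====
-- def findMirror(island, ignore=-1, fix_mistake=False):
--     left_columns = 0
--     for column in range(1, len(island[0])):
--         fixed_mistake = False
--         mirror = True
--         for row in island:
--             right = column
--             left = right - 1
--             while left >= 0 and right < len(island[0]):
--                 if row[left] != row[right]:
--                     if fix_mistake and not fixed_mistake:
--                         fixed_mistake = True
--                     else:
--                         mirror = False
--                 left -= 1
--                 right += 1
--             if not mirror:
--                 break
--         if mirror and column != ignore:
--             left_columns = column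
--             break
--     return left_columns
-- ===== SOURCE B (Python) =====
-- def findMirror(island, ignore=-1, fix_mistake=False):
--     cols = list(zip(*island))
--     w = len(cols)
--     allowed = 1 if fix_mistake else 0
--     dist = [[sum(x != y for x, y in zip(a, b)) for b in cols] for a in cols]
--     for c in range(1, w):
--         if c == ignore:
--             continue
--         total = sum(dist[c - 1 - k][c + k] for k in range(min(c, w - c)))
--         if total <= allowed:
--             return c
--     return 0
-- ===== Notes on version B (the rewrite author's own statement) =====
-- stated objective: alternative
-- what changed: B transposes the grid into column tuples once, precomputes the pairwise column-mismatch (Hamming distance) matrix, and decides each candidate reflection line purely by summing matrix entries for the mirrored column pairs against an allowance, instead of A's per-row character index walk with mutable smudge/mirror flags and two break levels. Pre_ excludes the empty island and ragged islands (a row shorter than the first): there A scans the full first-row width and can raise IndexError or judge columns against out-of-range characters, while B's zip-transpose truncates to the shortest row.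
-- outside the precondition, e.g. on findMirror([], -1, False): A raises IndexError, B returns 0; on findMirror(['.##', '#.###', '.'], 1, True): A raises IndexError, B returns 0; on findMirror(['.###.#', '..##'], 1, False): A returns 0, B returns 3
import Mathlib
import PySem

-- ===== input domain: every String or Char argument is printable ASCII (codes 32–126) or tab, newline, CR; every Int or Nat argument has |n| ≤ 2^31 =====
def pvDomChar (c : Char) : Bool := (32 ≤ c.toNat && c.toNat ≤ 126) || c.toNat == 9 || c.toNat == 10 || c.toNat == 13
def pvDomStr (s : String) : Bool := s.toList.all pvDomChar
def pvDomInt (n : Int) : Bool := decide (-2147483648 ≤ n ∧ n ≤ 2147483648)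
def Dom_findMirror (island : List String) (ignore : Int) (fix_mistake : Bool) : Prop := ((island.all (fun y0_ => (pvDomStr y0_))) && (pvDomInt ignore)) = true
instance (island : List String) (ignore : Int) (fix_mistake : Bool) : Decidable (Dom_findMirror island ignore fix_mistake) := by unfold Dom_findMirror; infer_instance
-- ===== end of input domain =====

-- B transposes the grid once, precomputes the pairwise column-distance matrix, and answers each
-- candidate column by summing matrix entries against an allowance; objective: alternative algorithm.

-- ===== PORT A =====
-- the inner `while left >= 0 and right < len(island[0])` loop, threading (fixed_mistake, mirror);
-- fuel = w.toNat + 1 is enough since `right` increases each step and the loop stops at right ≥ w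
def pvA_while (fuel : Nat) (row : List Char) (w : Int) (left right : Int)
    (fix fixed mirror : Bool) : Bool × Bool :=
  match fuel with
  | 0 => (fixed, mirror)
  | fuel + 1 =>
    if 0 ≤ left ∧ right < w then
      if PySem.List.pyGet? row left ≠ PySem.List.pyGet? row right then
        if fix ∧ fixed = false then
          pvA_while fuel row w (left - 1) (right + 1) fix true mirror
        else
          pvA_while fuel row w (left - 1) (right + 1) fix fixed false
      else
        pvA_while fuel row w (left - 1) (right + 1) fix fixed mirror
    else (fixed, mirror)

-- the `for row in island` loop with the `if not mirror: break`
def pvA_rows (rows : List String) (w column : Int) (fix fixed mirror : Bool) : Bool :=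
  match rows with
  | [] => mirror
  | r :: rest =>
    let s := pvA_while (w.toNat + 1) r.toList w (column - 1) column fix fixed mirror
    if s.2 = false then s.2 else pvA_rows rest w column fix s.1 s.2

-- the `for column in range(1, len(island[0]))` loop with the accepting break
def pvA_cols (cols : List Int) (island : List String) (w ignore : Int) (fix : Bool) : Int :=
  match cols with
  | [] => 0
  | c :: rest =>
    if pvA_rows island w c fix false true = true ∧ c ≠ ignore then c
    else pvA_cols rest island w ignore fix

def findMirror (island : List String) (ignore : Int) (fix_mistake : Bool) : Int :=
  let w : Int := PySem.Str.len (island.headD "")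
  pvA_cols (PySem.List.pyRange 1 w 1) island w ignore fix_mistake

-- ===== PORT B =====
-- cols = list(zip(*island)): Python's truncating transpose (zip of the rows)
def pvTranspose : List (List Char) → List (List Char)
  | [] => []
  | r0 :: rs =>
    if h : (r0 :: rs).any (·.isEmpty) then []
    else ((r0 :: rs).map (fun r => r.headD default)) :: pvTranspose ((r0 :: rs).map (·.tail))
  termination_by rows => (rows.headD []).length
  decreasing_by
    simp only [List.any_eq_true] at h
    push Not at h
    have h0 := h r0 (by simp)
    cases r0 with
    | nil => simp at h0
    | cons a as => simp

-- dist = [[sum(x != y for x, y in zip(a, b)) for b in cols] for a in cols]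
def pvB_dist (cols : List (List Char)) : List (List Nat) :=
  cols.map (fun a => cols.map (fun b => (a.zip b).countP (fun p => p.1 ≠ p.2)))

-- total = sum(dist[c-1-k][c+k] for k in range(min(c, w-c)))
def pvB_total (dist : List (List Nat)) (c w : Int) : Nat :=
  (PySem.List.pyRange 0 (min c (w - c)) 1).foldl
    (fun acc k => acc + PySem.List.pyGetD (PySem.List.pyGetD dist (c - 1 - k) []) (c + k) 0) 0

-- the `for c in range(1, w)` loop: skip ignore, return first c within the allowance
def pvB_cols (colsIdx : List Int) (dist : List (List Nat)) (w ignore : Int) (allowed : Nat) : Int :=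
  match colsIdx with
  | [] => 0
  | c :: rest =>
    if c = ignore then pvB_cols rest dist w ignore allowed
    else if pvB_total dist c w ≤ allowed then c
    else pvB_cols rest dist w ignore allowed

def findMirror_alt (island : List String) (ignore : Int) (fix_mistake : Bool) : Int :=
  let cols := pvTranspose (island.map String.toList)
  let w : Int := cols.length
  let allowed : Nat := if fix_mistake then 1 else 0
  let dist := pvB_dist cols
  pvB_cols (PySem.List.pyRange 1 w 1) dist w ignore allowed

-- ===== PRECONDITION & SPEC =====
-- Pre_ excludes the empty island (A raises IndexError on island[0]) and islands with a row
-- shorter than the first row, on which A's inner scan can raise IndexError (whether it does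
-- depends on mismatches found in earlier rows; B never indexes out of range there).
def Pre_findMirror (island : List String) (ignore : Int) (fix_mistake : Bool) : Prop :=
  island ≠ [] ∧ ∀ r ∈ island, PySem.Str.len (island.headD "") ≤ PySem.Str.len r
instance (island : List String) (ignore : Int) (fix_mistake : Bool) : Decidable (Pre_findMirror island ignore fix_mistake) := by unfold Pre_findMirror; infer_instance

def pvWitness_findMirror : List String × Int × Bool := (["#..#.", "#..##"], -1, true)

def Spec_findMirror (island : List String) (ignore : Int) (fix_mistake : Bool) (out : Int) : Prop := out = findMirror_alt island ignore fix_mistake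
instance (island : List String) (ignore : Int) (fix_mistake : Bool) (out : Int) : Decidable (Spec_findMirror island ignore fix_mistake out) := by unfold Spec_findMirror; infer_instance

-- ===== CLAIM (what is proved, stated in full; the proofs are below) =====
def Claim_equal_findMirror : Prop := ∀ (island : List String) (ignore : Int) (fix_mistake : Bool), Dom_findMirror island ignore fix_mistake → Pre_findMirror island ignore fix_mistake → Spec_findMirror island ignore fix_mistake (findMirror island ignore fix_mistake)

-- ===== LEMMAS AND PROOFS =====

-- the state update A performs on one mismatching pair
def pvStep (fix : Bool) (s : Bool × Bool) : Bool × Bool :=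
  if fix ∧ s.1 = false then (true, s.2) else (s.1, false)

def pvApplyN (fix : Bool) (m : Nat) (s : Bool × Bool) : Bool × Bool :=
  match m with
  | 0 => s
  | m + 1 => pvApplyN fix m (pvStep fix s)

-- remaining mismatch budget of a state
def pvRem (fix fixed : Bool) : Nat := if fix ∧ fixed = false then 1 else 0

-- mismatch count along A's walk
def pvWalkM (fuel : Nat) (row : List Char) (w left right : Int) : Nat :=
  match fuel with
  | 0 => 0
  | fuel + 1 =>
    if 0 ≤ left ∧ right < w then
      (if PySem.List.pyGet? row left ≠ PySem.List.pyGet? row right then 1 else 0)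
        + pvWalkM fuel row w (left - 1) (right + 1)
    else 0

theorem pvA_while_eq (fuel : Nat) (row : List Char) (w : Int) :
    ∀ (l r : Int) (fix fixed mirror : Bool),
      pvA_while fuel row w l r fix fixed mirror
        = pvApplyN fix (pvWalkM fuel row w l r) (fixed, mirror) := by
  induction fuel with
  | zero => intro l r fix fixed mirror; rfl
  | succ fuel ih =>
    intro l r fix fixed mirror
    simp only [pvA_while, pvWalkM]
    by_cases hg : 0 ≤ l ∧ r < w
    · simp only [if_pos hg]
      by_cases hm : PySem.List.pyGet? row l ≠ PySem.List.pyGet? row r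
      · simp only [if_pos hm]
        have hsum : (1 : Nat) + pvWalkM fuel row w (l - 1) (r + 1)
            = pvWalkM fuel row w (l - 1) (r + 1) + 1 := Nat.add_comm _ _
        by_cases hf : fix ∧ fixed = false
        · simp only [if_pos hf, ih, hsum]
          have : pvStep fix (fixed, mirror) = (true, mirror) := by
            simp [pvStep, hf]
          simp [pvApplyN, this]
        · simp only [if_neg hf, ih, hsum]
          have : pvStep fix (fixed, mirror) = (fixed, false) := by
            simp only [pvStep]; rw [if_neg]; exact hf
          simp [pvApplyN, this]
      · simp only [if_neg hm, ih]
        simp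
    · simp [hg, pvApplyN]

theorem pvApplyN_char (fix : Bool) (m : Nat) :
    ∀ (fixed mirror : Bool),
      pvApplyN fix m (fixed, mirror)
        = (fixed || (fix && decide (1 ≤ m)), mirror && decide (m ≤ pvRem fix fixed)) := by
  induction m with
  | zero => intro fixed mirror; cases fix <;> cases fixed <;> simp [pvApplyN, pvRem]
  | succ m ih =>
    intro fixed mirror
    cases fix <;> cases fixed <;>
      simp [pvApplyN, pvStep, ih, pvRem]

-- total walk mismatches across rows
def pvTotalW (rows : List String) (w c : Int) : Nat :=
  match rows with
  | [] => 0
  | r :: rest => pvWalkM (w.toNat + 1) r.toList w (c - 1) c + pvTotalW rest w c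

theorem pvA_rows_char (w c : Int) (fix : Bool) :
    ∀ (rows : List String) (fixed : Bool),
      pvA_rows rows w c fix fixed true = decide (pvTotalW rows w c ≤ pvRem fix fixed) := by
  intro rows
  induction rows with
  | nil => intro fixed; simp [pvA_rows, pvTotalW]
  | cons r rest ih =>
    intro fixed
    set m := pvWalkM (w.toNat + 1) r.toList w (c - 1) c with hm
    have hs : pvA_while (w.toNat + 1) r.toList w (c - 1) c fix fixed true
        = (fixed || (fix && decide (1 ≤ m)), decide (m ≤ pvRem fix fixed)) := by
      rw [pvA_while_eq, pvApplyN_char, ← hm]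
      simp
    by_cases hle : m ≤ pvRem fix fixed
    · have h2 : (decide (m ≤ pvRem fix fixed)) = true := decide_eq_true hle
      have hrem : pvRem fix (fixed || (fix && decide (1 ≤ m))) = pvRem fix fixed - m := by
        cases fix with
        | false =>
          have h0 : pvRem false fixed = 0 := by simp [pvRem]
          rw [h0] at hle ⊢
          simp [pvRem]
        | true =>
          cases fixed with
          | true =>
            have h0 : pvRem true true = 0 := by simp [pvRem]
            rw [h0] at hle ⊢
            simp [pvRem]
          | false =>
            have h1 : pvRem true false = 1 := by simp [pvRem]
            rw [h1] at hle ⊢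
            interval_cases m <;> simp [pvRem]
      simp only [pvA_rows, pvTotalW, hs, h2]
      rw [if_neg (by simp), ih, hrem]
      have hiff : (pvTotalW rest w c ≤ pvRem fix fixed - m)
          ↔ (m + pvTotalW rest w c ≤ pvRem fix fixed) := by omega
      simp only [hiff, ← hm]
    · have h2 : (decide (m ≤ pvRem fix fixed)) = false := decide_eq_false hle
      have hno : ¬ (m + pvTotalW rest w c ≤ pvRem fix fixed) := by omega
      simp only [pvA_rows, pvTotalW, hs, h2]
      rw [if_pos (by simp)]
      exact (decide_eq_false hno).symm

-- pvTotalW is the sum of the per-row walk counts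
theorem pvTotalW_sum (w c : Int) : ∀ (rows : List String),
    pvTotalW rows w c
      = (rows.map (fun r => pvWalkM (w.toNat + 1) r.toList w (c - 1) c)).sum := by
  intro rows
  induction rows with
  | nil => rfl
  | cons r rest ih => simp [pvTotalW, ih]

-- A's walk, written as a sum of per-step mismatch indicators
theorem pvWalk_sum (n : Nat) : ∀ (fuel : Nat) (row : List Char) (w l r : Int),
    n = min (l + 1).toNat (w - r).toNat → n ≤ fuel →
    pvWalkM fuel row w l r
      = ((List.range n).map (fun (k : Nat) =>
          if PySem.List.pyGet? row (l - (k : Int)) ≠ PySem.List.pyGet? row (r + (k : Int)) then 1 else 0)).sum := by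
  induction n with
  | zero =>
    intro fuel row w l r hn _
    have hg : ¬ (0 ≤ l ∧ r < w) := by omega
    cases fuel with
    | zero => simp [pvWalkM]
    | succ fuel => simp [pvWalkM, hg]
  | succ n ih =>
    intro fuel row w l r hn hfuel
    match fuel, hfuel with
    | fuel + 1, _ =>
      have hg : 0 ≤ l ∧ r < w := by omega
      have hn' : n = min ((l - 1) + 1).toNat (w - (r + 1)).toNat := by omega
      simp only [pvWalkM, if_pos hg]
      rw [ih fuel row w (l - 1) (r + 1) hn' (by omega)]
      simp only [List.range_succ_eq_map, List.map_cons, List.map_map, List.sum_cons]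
      congr 1
      · norm_num
      · apply congrArg
        apply List.map_congr_left
        intro k _
        simp only [Function.comp]
        have h1 : l - ((k.succ : Nat) : Int) = (l - 1) - (k : Int) := by push_cast; ring
        have h2 : r + ((k.succ : Nat) : Int) = (r + 1) + (k : Int) := by push_cast; ring
        rw [h1, h2]

-- sum over rows of a sum over k equals the sum over k of a sum over rows
theorem pvSwap (rows : List String) (n : Nat) (f : String → Nat → Nat) :
    (rows.map (fun r => ((List.range n).map (f r)).sum)).sum
      = ((List.range n).map (fun k => (rows.map (fun r => f r k)).sum)).sum := by
  induction rows with
  | nil => simp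
  | cons r rest ih => simp [List.sum_map_add, ih]

theorem pvTranspose_cons (r0 : List Char) (rs : List (List Char))
    (h : (r0 :: rs).any (·.isEmpty) = false) :
    pvTranspose (r0 :: rs)
      = ((r0 :: rs).map (fun r => r.headD default)) :: pvTranspose ((r0 :: rs).map (·.tail)) := by
  rw [pvTranspose]
  simp [h]

theorem pvTranspose_nil_of_empty (r0 : List Char) (rs : List (List Char))
    (h : (r0 :: rs).any (·.isEmpty) = true) : pvTranspose (r0 :: rs) = [] := by
  rw [pvTranspose]
  simp [h]

theorem pvTranspose_get : ∀ (i : Nat) (rows : List (List Char)), rows ≠ [] →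
    (∀ r ∈ rows, i < r.length) →
    (pvTranspose rows)[i]? = some (rows.map (fun r => r.getD i default)) := by
  intro i
  induction i with
  | zero =>
    intro rows hne hlt
    match rows with
    | r0 :: rs =>
      have hany : (r0 :: rs).any (·.isEmpty) = false := by
        simp only [List.any_eq_false]
        intro r hr
        have := hlt r hr
        cases r with
        | nil => simp at this
        | cons a as => simp
      rw [pvTranspose_cons _ _ hany]
      simp only [List.getElem?_cons_zero, Option.some.injEq]
      apply List.map_congr_left
      intro r hr
      have := hlt r hr
      cases r with
      | nil => simp at this
      | cons a as => rfl
  | succ i ih =>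
    intro rows hne hlt
    match rows with
    | r0 :: rs =>
      have hany : (r0 :: rs).any (·.isEmpty) = false := by
        simp only [List.any_eq_false]
        intro r hr
        have := hlt r hr
        cases r with
        | nil => simp at this
        | cons a as => simp
      rw [pvTranspose_cons _ _ hany]
      rw [List.getElem?_cons_succ]
      rw [ih ((r0 :: rs).map (·.tail)) (by simp) (by
        intro t ht
        obtain ⟨r, hr, rfl⟩ := List.mem_map.mp ht
        have := hlt r hr
        simp [List.length_tail]
        omega)]
      simp only [List.map_map, Option.some.injEq]
      apply List.map_congr_left
      intro r hr
      have := hlt r hr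
      simp only [Function.comp]
      rw [List.getD_eq_getElem?_getD, List.getD_eq_getElem?_getD, List.getElem?_tail]

theorem pvTranspose_length (n : Nat) : ∀ (rows : List (List Char)), rows ≠ [] →
    (rows.headD []).length = n → (∀ r ∈ rows, n ≤ r.length) →
    (pvTranspose rows).length = n := by
  induction n with
  | zero =>
    intro rows hne h0 _
    match rows with
    | r0 :: rs =>
      have hr0 : r0 = [] := by
        simp only [List.headD_cons] at h0
        cases r0 with
        | nil => rfl
        | cons a as => simp at h0
      subst hr0
      rw [pvTranspose_nil_of_empty _ _ (by simp)]
      rfl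
  | succ n ih =>
    intro rows hne h0 hlen
    match rows with
    | r0 :: rs =>
      have hany : (r0 :: rs).any (·.isEmpty) = false := by
        simp only [List.any_eq_false]
        intro r hr
        have := hlen r hr
        cases r with
        | nil => simp at this
        | cons a as => simp
      rw [pvTranspose_cons _ _ hany]
      simp only [List.length_cons]
      rw [ih ((r0 :: rs).map (·.tail)) (by simp) (by
          simp only [List.map_cons, List.headD_cons, List.length_tail]
          simp only [List.headD_cons] at h0
          omega) (by
          intro t ht
          obtain ⟨r, hr, rfl⟩ := List.mem_map.mp ht
          have := hlen r hr
          simp [List.length_tail]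
          omega)]

-- one mirror-pair term: the dist-matrix entry is the number of mismatching rows
theorem pvDist_entry (island : List String) (wn : Nat) (i j : Nat)
    (hne : island ≠ []) (hlen : ∀ r ∈ island, wn ≤ r.toList.length)
    (hi : i < wn) (hj : j < wn) :
    PySem.List.pyGetD (PySem.List.pyGetD (pvB_dist (pvTranspose (island.map String.toList))) (i : Int) []) (j : Int) 0
      = (island.map (fun r =>
          if PySem.List.pyGet? r.toList (i : Int) ≠ PySem.List.pyGet? r.toList (j : Int) then 1 else 0)).sum := by
  have hrne : island.map String.toList ≠ [] := by simpa using hne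
  have hlti : ∀ r ∈ island.map String.toList, i < r.length := by
    intro r hr
    obtain ⟨s, hs, rfl⟩ := List.mem_map.mp hr
    have := hlen s hs
    omega
  have hltj : ∀ r ∈ island.map String.toList, j < r.length := by
    intro r hr
    obtain ⟨s, hs, rfl⟩ := List.mem_map.mp hr
    have := hlen s hs
    omega
  have hgi := pvTranspose_get i (island.map String.toList) hrne hlti
  have hgj := pvTranspose_get j (island.map String.toList) hrne hltj
  set cols := pvTranspose (island.map String.toList) with hcols
  obtain ⟨hilt, hieq⟩ := List.getElem?_eq_some_iff.mp hgi
  obtain ⟨hjlt, hjeq⟩ := List.getElem?_eq_some_iff.mp hgj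
  have hstep : PySem.List.pyGetD (PySem.List.pyGetD (pvB_dist cols) (i : Int) []) (j : Int) 0
      = (cols[i].zip cols[j]).countP (fun p => decide (p.1 ≠ p.2)) := by
    simp only [pvB_dist, PySem.List.pyGetD_natCast, List.getD_eq_getElem?_getD,
      List.getElem?_map, List.getElem?_eq_getElem hilt, List.getElem?_eq_getElem hjlt,
      Option.map_some, Option.getD_some]
  rw [hstep, hieq, hjeq, List.zip_map', List.countP_map, List.countP_map]
  have hrhs : (island.map (fun r =>
      if PySem.List.pyGet? r.toList (i : Int) ≠ PySem.List.pyGet? r.toList (j : Int) then 1 else 0)).sum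
      = island.countP (fun r =>
          decide (PySem.List.pyGet? r.toList (i : Int) ≠ PySem.List.pyGet? r.toList (j : Int))) := by
    rw [← PySem.List.sum_map_ite_one_zero_nat]
    apply congrArg
    apply List.map_congr_left
    intro r _
    simp
  rw [hrhs]
  apply List.countP_congr
  intro r hr
  have hw := hlen r hr
  simp only [Function.comp]
  have h1 : PySem.List.pyGet? r.toList (i : Int) = some r.toList[i] := by
    rw [PySem.List.pyGet?_natCast, List.getElem?_eq_getElem (by omega)]
  have h2 : PySem.List.pyGet? r.toList (j : Int) = some r.toList[j] := by
    rw [PySem.List.pyGet?_natCast, List.getElem?_eq_getElem (by omega)]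
  simp [h1, h2, List.getElem?_eq_getElem (show i < r.toList.length by omega),
    List.getElem?_eq_getElem (show j < r.toList.length by omega)]

-- per-column equality of the two totals
theorem pvTotal_eq (island : List String) (wn : Nat) (c : Int)
    (hne : island ≠ []) (hlen : ∀ r ∈ island, wn ≤ r.toList.length)
    (hc1 : 1 ≤ c) (hcw : c < (wn : Int)) :
    pvTotalW island (wn : Int) c
      = pvB_total (pvB_dist (pvTranspose (island.map String.toList))) c (wn : Int) := by
  set n : Nat := min c.toNat ((wn : Int) - c).toNat with hn
  rw [pvTotalW_sum]
  rw [List.map_congr_left (g := fun r => ((List.range n).map (fun (k : Nat) =>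
        if PySem.List.pyGet? r.toList ((c - 1) - (k : Int)) ≠ PySem.List.pyGet? r.toList (c + (k : Int))
        then 1 else 0)).sum) (by
      intro r _
      exact pvWalk_sum n ((wn : Int).toNat + 1) r.toList (wn : Int) (c - 1) c (by omega) (by omega))]
  rw [pvSwap island n (fun r (k : Nat) =>
        if PySem.List.pyGet? r.toList ((c - 1) - (k : Int)) ≠ PySem.List.pyGet? r.toList (c + (k : Int))
        then 1 else 0)]
  rw [pvB_total, PySem.List.foldl_add_nat, Nat.zero_add]
  rw [PySem.List.pyRange_one 0 (min c ((wn : Int) - c))]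
  simp only [List.map_map]
  rw [show (min c ((wn : Int) - c) - 0).toNat = n from by omega]
  apply congrArg
  apply List.map_congr_left
  intro k hk
  have hkn : k < n := List.mem_range.mp hk
  simp only [Function.comp, zero_add]
  have hd := pvDist_entry island wn (c - 1 - (k : Int)).toNat (c + (k : Int)).toNat hne hlen
    (by omega) (by omega)
  rw [show ((((c - 1 - (k : Int)).toNat : Nat)) : Int) = (c - 1) - (k : Int) from by omega,
      show ((((c + (k : Int)).toNat : Nat)) : Int) = c + (k : Int) from by omega] at hd
  rw [show c - 1 - (k : Int) = (c - 1) - (k : Int) from by ring] at hd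
  exact hd.symm

theorem pvCols_eq (island : List String) (wn : Nat) (ignore : Int) (fix : Bool)
    (hne : island ≠ []) (hlen : ∀ r ∈ island, wn ≤ r.toList.length) :
    ∀ (cols : List Int), (∀ c ∈ cols, 1 ≤ c ∧ c < (wn : Int)) →
      pvA_cols cols island (wn : Int) ignore fix
        = pvB_cols cols (pvB_dist (pvTranspose (island.map String.toList))) (wn : Int) ignore
            (if fix then 1 else 0) := by
  intro cols
  induction cols with
  | nil => intro _; rfl
  | cons c rest ih =>
    intro hmem
    obtain ⟨hc1, hcw⟩ := hmem c (by simp)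
    have hrest : ∀ x ∈ rest, 1 ≤ x ∧ x < (wn : Int) := fun x hx => hmem x (by simp [hx])
    simp only [pvA_cols, pvB_cols]
    rw [pvA_rows_char, pvTotal_eq island wn c hne hlen hc1 hcw]
    have hrem : pvRem fix false = (if fix then 1 else 0) := by cases fix <;> simp [pvRem]
    rw [hrem]
    by_cases hig : c = ignore
    · simp [hig, ih hrest]
    · by_cases hle : pvB_total (pvB_dist (pvTranspose (island.map String.toList))) c (wn : Int)
          ≤ (if fix then 1 else 0) <;> simp [hig, hle, ih hrest]

-- ===== VERDICT (by name: the statement is the Claim_ definition above) =====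
theorem findMirror_spec : Claim_equal_findMirror := by
  intro island ignore fix_mistake _hdom hpre
  obtain ⟨hne, hlen⟩ := hpre
  unfold Spec_findMirror findMirror findMirror_alt
  set wn : Nat := (island.headD "").toList.length with hwn
  have hlen' : ∀ r ∈ island, wn ≤ r.toList.length := by
    intro r hr
    have := hlen r hr
    rw [PySem.Str.len_eq, PySem.Str.len_eq] at this
    omega
  have hw : PySem.Str.len (island.headD "") = (wn : Int) := by
    rw [PySem.Str.len_eq]
  have hT : (pvTranspose (island.map String.toList)).length = wn := by
    apply pvTranspose_length wn
    · simpa using hne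
    · cases island with
      | nil => exact absurd rfl hne
      | cons s rest => simp [hwn]
    · intro r hr
      obtain ⟨s, hs, rfl⟩ := List.mem_map.mp hr
      exact hlen' s hs
  simp only [hw, hT]
  apply pvCols_eq island wn ignore fix_mistake hne hlen'
  intro c hc
  rw [PySem.List.mem_pyRange_one] at hc
  exact hc
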